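-- pv_equiv track=rewrite | github.com/ludo2ne/ENSAI-1A-STID-remise-en-jambe | annales/2023-2024/src/trouver_code.py | trouver_code
-- ===== SOURCE A (Python) =====
-- def trouver_code(texte, taille) -> int:
--     """
--     Fonction qui recherche la première occurence de n caractères consécutifs différents dans une chaine de caractères
--
--     Paramétres :
--       texte (str) : la chaine à tester
--       taille (int) : le nombre de caractères consécutifs différents
--
--     Sortie:
--       int : position du dernier caractère de la première occurrence trouvée
--     """
--
--     # Liste pour stocker au fur et à mesure les caractères consécutifs que l'on va tester
--     caracteres_consecutifs = []
--
--     # Parcours de la chaine de caractères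
--     for i in range(len(texte)):
--         caracteres_consecutifs.append(texte[i])  # On ajoute le caractère courant
--
--         # Si trop de caractères, on supprime le plus "vieux"
--         if len(caracteres_consecutifs) > taille:
--             caracteres_consecutifs.pop(0)
--
--         # Si tous les caractères sont différents et la taille est bonne, on affiche le résultat
--         if len(set(caracteres_consecutifs)) == taille:
--             return i + 1
-- ===== SOURCE B (Python) =====
-- def trouver_code(texte, taille):
--     # Two staged passes: first compute, for every position i, the length of the
--     # longest duplicate-free run ending at i (via last-seen indices); then scan
--     # for the first run of length >= taille. O(n) overall.
--     derniere = {}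
--     runs = []
--     run = 0
--     for i, c in enumerate(texte):
--         run += 1
--         if c in derniere and i - derniere[c] < run:
--             run = i - derniere[c]
--         derniere[c] = i
--         runs.append(run)
--     for i, r in enumerate(runs):
--         if r >= taille:
--             return i + 1
--     return None
-- ===== Notes on version B (the rewrite author's own statement) =====
-- stated objective: faster
-- what changed: Replaces the per-character window list plus set() rebuild (O(n*taille)) with two staged O(n) passes: one computing for every index the length of the distinct run ending there via last-seen indices, then a scan for the first run >= taille.
-- outside the precondition, e.g. on trouver_code('ab', -1): A returns None, B returns 1
import Mathlib
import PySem

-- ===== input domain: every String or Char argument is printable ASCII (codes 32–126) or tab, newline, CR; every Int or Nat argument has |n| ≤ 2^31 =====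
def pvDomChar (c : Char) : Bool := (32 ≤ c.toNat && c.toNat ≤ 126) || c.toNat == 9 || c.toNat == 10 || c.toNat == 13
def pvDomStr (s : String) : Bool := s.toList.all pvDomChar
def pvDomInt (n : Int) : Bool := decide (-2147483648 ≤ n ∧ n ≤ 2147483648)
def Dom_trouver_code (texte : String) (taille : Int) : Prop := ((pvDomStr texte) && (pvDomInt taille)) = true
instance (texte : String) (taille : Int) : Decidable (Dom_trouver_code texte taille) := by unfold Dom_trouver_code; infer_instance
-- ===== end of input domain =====

-- B replaces A's per-step window list + set() rebuild with two staged passes: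
-- one building the distinct-run length at every index, one scanning for the first
-- run ≥ taille (objective: faster; a timing run measures the ratio).

-- ===== PORT A =====
-- loop 'for i in range(len(texte))' carrying the list caracteres_consecutifs;
-- pop(0) on the (always nonempty) freshly appended list is '.drop 1' (exact here).
def trouverCodeAux (taille : Int) (rest : List Char) (i : Int) (w : List Char) : Option Int :=
  match rest with
  | [] => none
  | c :: rest' =>
    let w1 := w ++ [c]
    let w2 := if (w1.length : Int) > taille then w1.drop 1 else w1
    if ((PySem.Set.ofList w2).length : Int) = taille then some (i + 1)
    else trouverCodeAux taille rest' (i + 1) w2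

def trouver_code (texte : String) (taille : Int) : Option Int :=
  trouverCodeAux taille texte.toList 0 []

-- ===== PORT B =====
-- pass 1: build the list 'runs' (runs.append in the Python is 'acc ++ [run2]')
def buildRuns (rest : List Char) (i : Int) (run : Int)
    (derniere : PySem.Dict Char Int) (acc : List Int) : List Int :=
  match rest with
  | [] => acc
  | c :: rest' =>
    let run1 := run + 1
    let run2 :=
      match derniere.get? c with
      | some p => if i - p < run1 then i - p else run1
      | none => run1
    buildRuns rest' (i + 1) run2 (derniere.insert c i) (acc ++ [run2])

-- pass 2: first index whose run is long enough
def scanRuns (runs : List Int) (i : Int) (taille : Int) : Option Int :=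
  match runs with
  | [] => none
  | r :: rs => if r ≥ taille then some (i + 1) else scanRuns rs (i + 1) taille

def trouver_code_alt (texte : String) (taille : Int) : Option Int :=
  scanRuns (buildRuns texte.toList 0 0 PySem.Dict.empty []) 0 taille

-- ===== PRECONDITION & SPEC =====
-- Pre_ excludes negative taille, a nonsensical requested length on which A's None and
-- B's immediate 1 (any one-character run satisfies the length condition) are both
-- unspecified corner artefacts.
def Pre_trouver_code (texte : String) (taille : Int) : Prop := 0 ≤ taille
instance (texte : String) (taille : Int) : Decidable (Pre_trouver_code texte taille) := by
  unfold Pre_trouver_code; infer_instance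

def pvWitness_trouver_code : String × Int := ("abcab", 3)

def Spec_trouver_code (texte : String) (taille : Int) (out : Option Int) : Prop := out = trouver_code_alt texte taille
instance (texte : String) (taille : Int) (out : Option Int) : Decidable (Spec_trouver_code texte taille out) := by unfold Spec_trouver_code; infer_instance

-- ===== CLAIM (what is proved, stated in full; the proofs are below) =====
def Claim_equal_trouver_code : Prop := ∀ (texte : String) (taille : Int), Dom_trouver_code texte taille → Pre_trouver_code texte taille → Spec_trouver_code texte taille (trouver_code texte taille)

-- ===== LEMMAS AND PROOFS =====

theorem pv_nodup_append_singleton {α : Type} (p : List α) (c : α) :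
    (p ++ [c]).Nodup ↔ p.Nodup ∧ c ∉ p := by
  simp [List.nodup_append]
  intro _
  constructor
  · intro h hc; exact h c hc rfl
  · intro h a ha heq; exact h (heq ▸ ha)

theorem pv_drop_append_singleton {α : Type} (p : List α) (c : α) (s : Nat) (hs : s ≤ p.length) :
    (p ++ [c]).drop s = p.drop s ++ [c] := by
  rw [List.drop_append_of_le_length hs]

-- set(w) has as many elements as w  ↔  w has no duplicates
theorem pv_len_ofList_eq_iff {α : Type} [BEq α] [LawfulBEq α] (w : List α) :
    (PySem.Set.ofList w).length = w.length ↔ w.Nodup := by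
  constructor
  · induction w using List.reverseRecOn with
    | nil => intro _; exact List.nodup_nil
    | append_singleton xs x ih =>
      intro h
      rw [PySem.Set.ofList_append_singleton xs x] at h
      unfold PySem.Set.add at h
      by_cases hc : PySem.Set.contains (PySem.Set.ofList xs) x = true
      · rw [if_pos hc] at h
        have hle := PySem.Set.length_ofList_le xs
        simp at h
        omega
      · rw [if_neg hc] at h
        simp at h
        have hx : ¬ x ∈ xs := by
          intro hmem
          apply hc
          unfold PySem.Set.contains
          simp [hmem]
        rw [pv_nodup_append_singleton]
        exact ⟨ih h, hx⟩
  · intro h; rw [PySem.Set.ofList_eq_self_of_nodup w h]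

-- buildRuns only ever appends to its accumulator
theorem pv_buildRuns_acc (rest : List Char) :
    ∀ (i run : Int) (der : PySem.Dict Char Int) (acc : List Int),
      buildRuns rest i run der acc = acc ++ buildRuns rest i run der [] := by
  induction rest with
  | nil => intro i run der acc; simp [buildRuns]
  | cons c rest' ih =>
    intro i run der acc
    rw [buildRuns, buildRuns]
    rw [ih _ _ _ (acc ++ _), ih _ _ _ ([] ++ _)]
    simp

-- the combined loop lemma: A's window loop agrees with B's build-then-scan, given
-- the sliding-window invariants on the processed prefix p:
-- (a) debut marks exactly the duplicate-free suffixes of p,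
-- (b) derniere maps each character to the index of its last occurrence in p (-1 if absent),
-- (c) every stored index is nonnegative; B's running 'run' equals p.length - debut.
theorem pv_loops_eq (t : Int) (ht : 0 ≤ t) (rest : List Char) :
    ∀ (p : List Char) (debut : Int) (der : PySem.Dict Char Int),
      0 ≤ debut →
      (∀ s : Nat, ((p.drop s).Nodup ↔ debut ≤ (s : Int))) →
      (∀ c (s : Nat), (c ∈ p.drop s ↔ (s : Int) ≤ der.getD c (-1))) →
      (∀ c v, der.get? c = some v → 0 ≤ v) →
      trouverCodeAux t rest (p.length : Int) (p.drop (p.length - t.toNat)) =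
        scanRuns (buildRuns rest (p.length : Int) ((p.length : Int) - debut) der [])
          (p.length : Int) t := by
  induction rest with
  | nil => intro p debut der _ _ _ _; rfl
  | cons c rest' ih =>
    intro p debut der hdeb_lb ha hb hcnn
    have hT0 : ((t.toNat : Int)) = t := Int.toNat_of_nonneg ht
    set T := t.toNat with hT
    have hprec : der.getD c (-1) < (p.length : Int) := by
      by_contra hlt
      push_neg at hlt
      have : c ∈ p.drop p.length := (hb c p.length).2 hlt
      simp at this
    have hdeb_ub : debut ≤ (p.length : Int) := (ha p.length).1 (by simp)
    rw [trouverCodeAux]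
    rw [buildRuns, pv_buildRuns_acc, List.nil_append, List.singleton_append, scanRuns]
    set i : Int := (p.length : Int) with hi
    set prec := der.getD c (-1) with hprecdef
    set debut' := if prec + 1 > debut then prec + 1 else debut with hdebut'
    set der' := der.insert c i with hder'
    set w := p.drop (p.length - T) with hw
    set p' := p ++ [c] with hp'
    -- B's new run value equals i + 1 - debut'
    have hrun2 : (match der.get? c with
        | some q => if i - q < (i - debut) + 1 then i - q else (i - debut) + 1
        | none => (i - debut) + 1) = i + 1 - debut' := by
      by_cases hpd : prec + 1 > debut
      · have hdd : debut' = prec + 1 := by rw [hdebut', if_pos hpd]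
        cases hg : der.get? c with
        | none =>
          have hp1 : prec = -1 := by
            rw [hprecdef, PySem.Dict.getD_eq_get?_getD, hg]; rfl
          exact absurd hpd (by omega)
        | some q =>
          have hpq : prec = q := by
            rw [hprecdef, PySem.Dict.getD_eq_get?_getD, hg]; rfl
          show (if i - q < (i - debut) + 1 then i - q else (i - debut) + 1) = i + 1 - debut'
          rw [if_pos (by omega), hdd]
          omega
      · have hdd : debut' = debut := by rw [hdebut', if_neg hpd]
        cases hg : der.get? c with
        | none =>
          show (i - debut) + 1 = i + 1 - debut'
          rw [hdd]; ring
        | some q =>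
          have hpq : prec = q := by
            rw [hprecdef, PySem.Dict.getD_eq_get?_getD, hg]; rfl
          show (if i - q < (i - debut) + 1 then i - q else (i - debut) + 1) = i + 1 - debut'
          rw [if_neg (by omega), hdd]
          ring
    rw [hrun2]
    have hwlen : w.length = p.length - (p.length - T) := by simp [hw]
    have hplen' : p'.length = p.length + 1 := by simp [hp']
    have hw1 : w ++ [c] = p'.drop (p.length - T) := by
      rw [hw, hp', pv_drop_append_singleton p c _ (by omega)]
    -- the window after the conditional pop is the last min(|p'|,T) characters of p'
    have hw2 : (if ((w ++ [c]).length : Int) > t then (w ++ [c]).drop 1 else (w ++ [c]))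
        = p'.drop (p'.length - T) := by
      have hlen1 : (w ++ [c]).length = (p.length - (p.length - T)) + 1 := by
        simp [hwlen]
      by_cases hge : T ≤ p.length
      · have hcond : ((w ++ [c]).length : Int) > t := by
          rw [hlen1]; push_cast; omega
        rw [if_pos hcond, hw1, List.drop_drop]
        congr 1; omega
      · have hcond : ¬ ((w ++ [c]).length : Int) > t := by
          rw [hlen1]; push_cast; omega
        rw [if_neg hcond, hw1]
        congr 1; omega
    rw [hw2]
    set w2 := p'.drop (p'.length - T) with hw2d
    have hw2len : w2.length = p'.length - (p'.length - T) := by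
      rw [hw2d]; simp
    have hdeb'_lb : 0 ≤ debut' := by
      rw [hdebut']
      split
      · by_cases hg : der.get? c = none
        · have : prec = -1 := by
            rw [hprecdef, PySem.Dict.getD_eq_get?_getD, hg]; rfl
          omega
        · obtain ⟨q, hq⟩ := Option.ne_none_iff_exists'.1 hg
          have hq0 := hcnn c q hq
          have : prec = q := by
            rw [hprecdef, PySem.Dict.getD_eq_get?_getD, hq]; rfl
          omega
      · exact hdeb_lb
    -- invariant (a) for the extended prefix
    have ha' : ∀ s : Nat, ((p'.drop s).Nodup ↔ debut' ≤ (s : Int)) := by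
      intro s
      by_cases hs : s ≤ p.length
      · rw [hp', pv_drop_append_singleton p c s hs, pv_nodup_append_singleton,
          ha s, hb c s]
        constructor
        · rintro ⟨h1, h2⟩
          rw [hdebut']; split <;> omega
        · intro hle
          rw [hdebut'] at hle
          refine ⟨by split_ifs at hle <;> omega, ?_⟩
          intro hmem
          split_ifs at hle <;> omega
      · have hnil : p'.drop s = [] := by
          apply List.drop_eq_nil_of_le; omega
        rw [hnil]
        simp only [List.nodup_nil, true_iff]
        rw [hdebut']; split <;> omega
    -- invariant (b) for the extended prefix
    have hb' : ∀ d (s : Nat), (d ∈ p'.drop s ↔ (s : Int) ≤ der'.getD d (-1)) := by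
      intro d s
      by_cases hdc : d = c
      · subst hdc
        rw [hder', PySem.Dict.getD_insert, if_pos rfl]
        constructor
        · intro hmem
          have hlt : s < p'.length := by
            by_contra hge
            push_neg at hge
            rw [List.drop_eq_nil_of_le hge] at hmem
            simp at hmem
          rw [hi]; rw [hplen'] at hlt; exact_mod_cast Nat.lt_succ_iff.1 hlt
        · intro hle
          have hs : s ≤ p.length := by
            rw [hi] at hle; exact_mod_cast hle
          rw [hp', pv_drop_append_singleton p d s hs]
          simp
      · rw [hder', PySem.Dict.getD_insert, if_neg hdc]
        by_cases hs : s ≤ p.length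
        · rw [hp', pv_drop_append_singleton p c s hs]
          simp only [List.mem_append, List.mem_singleton]
          rw [← hb d s]
          constructor
          · rintro (h | h)
            · exact h
            · exact absurd h hdc
          · intro h; exact Or.inl h
        · have hnil : p'.drop s = [] := by
            apply List.drop_eq_nil_of_le; omega
          rw [hnil]
          constructor
          · intro h; simp at h
          · intro hle
            have hmem : d ∈ p.drop s := (hb d s).2 hle
            rw [List.drop_eq_nil_of_le (by omega)] at hmem
            simp at hmem
    -- invariant (c) for the extended dict
    have hcnn' : ∀ d v, der'.get? d = some v → 0 ≤ v := by
      intro d v hv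
      rw [hder', PySem.Dict.get?_insert] at hv
      split_ifs at hv with hd
      · cases hv; rw [hi]; exact_mod_cast Int.natCast_nonneg p.length
      · exact hcnn d v hv
    -- the two step conditions agree
    have hcond : (((PySem.Set.ofList w2).length : Int) = t) ↔ (i + 1 - debut' ≥ t) := by
      by_cases hge : T ≤ p'.length
      · have hlen : w2.length = T := by omega
        have hcast : ((p'.length - T : Nat) : Int) = i + 1 - t := by
          rw [hi]; push_cast [hplen']; omega
        constructor
        · intro h
          have hnd : w2.Nodup := by
            rw [← pv_len_ofList_eq_iff w2]
            omega
          have hnd' : (p'.drop (p'.length - T)).Nodup := hnd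
          have := (ha' (p'.length - T)).1 hnd'
          rw [hcast] at this; omega
        · intro h
          have hle : debut' ≤ ((p'.length - T : Nat) : Int) := by
            rw [hcast]; omega
          have hnd : w2.Nodup := (ha' _).2 hle
          have := (pv_len_ofList_eq_iff w2).2 hnd
          omega
      · push_neg at hge
        have hlen : w2.length = p'.length := by omega
        have hub := PySem.Set.length_ofList_le w2
        constructor
        · intro h; exfalso; omega
        · intro h; exfalso; omega
    by_cases hc2 : ((PySem.Set.ofList w2).length : Int) = t
    · rw [if_pos hc2, if_pos (hcond.1 hc2)]
    · rw [if_neg hc2, if_neg (fun hh => hc2 (hcond.2 hh))]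
      have hlen' : (p'.length : Int) = i + 1 := by rw [hi]; push_cast [hplen']; ring
      have hrec := ih p' debut' der' hdeb'_lb ha' hb' hcnn'
      rw [hlen'] at hrec
      have hrun' : i + 1 - debut' = (i + 1) - debut' := rfl
      rw [hrec]

-- ===== VERDICT (by name: the statement is the Claim_ definition above) =====
theorem trouver_code_spec : Claim_equal_trouver_code := by
  intro texte taille _ hpre
  unfold Spec_trouver_code trouver_code trouver_code_alt
  have h := pv_loops_eq taille hpre texte.toList [] 0 PySem.Dict.empty le_rfl
    (by intro s; simpa using Int.natCast_nonneg s)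
    (by intro c s; simp [PySem.Dict.getD_empty]; omega)
    (by intro c v hv; simp [PySem.Dict.get?_empty] at hv)
  simpa using h
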